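-- pv_equiv track=rewrite | github.com/onettoo/MedContract | database/db.py | _convert_qmark_to_pyformat
-- ===== SOURCE A (Python) =====
-- def _convert_qmark_to_pyformat(query: str) -> str:
--     if "?" not in query:
--         return query
--
--     out: list[str] = []
--     i = 0
--     n = len(query)
--     in_single = False
--     in_double = False
--
--     while i < n:
--         ch = query[i]
--
--         if in_single:
--             out.append(ch)
--             # escape de aspas simples em SQL: ''
--             if ch == "'" and i + 1 < n and query[i + 1] == "'":
--                 i += 1
--                 out.append(query[i])
--             elif ch == "'":
--                 in_single = False
--             i += 1
--             continue
--
--         if in_double: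
--             out.append(ch)
--             if ch == '"':
--                 in_double = False
--             i += 1
--             continue
--
--         if ch == "'":
--             in_single = True
--             out.append(ch)
--             i += 1
--             continue
--         if ch == '"':
--             in_double = True
--             out.append(ch)
--             i += 1
--             continue
--         if ch == "?":
--             out.append("%s")
--             i += 1
--             continue
--
--         out.append(ch)
--         i += 1
--
--     return "".join(out)
-- ===== SOURCE B (Python) =====
-- def _convert_qmark_to_pyformat(query: str) -> str:
--     # Chunked rewrite: copy quoted spans verbatim, replace "?" only in the
--     # unquoted chunks between them.  SQL's '' escape inside a single-quoted
--     # string behaves exactly like closing and immediately reopening the quote,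
--     # so finding the next matching quote character is enough.
--     parts = []
--     rest = query
--     while rest:
--         sq = rest.find("'")
--         dq = rest.find('"')
--         j = sq if dq == -1 else dq if sq == -1 else min(sq, dq)
--         if j == -1:
--             parts.append(rest.replace("?", "%s"))
--             break
--         parts.append(rest[:j].replace("?", "%s"))
--         q = rest[j]
--         k = rest.find(q, j + 1)
--         if k == -1:
--             parts.append(rest[j:])
--             break
--         parts.append(rest[j:k + 1])
--         rest = rest[k + 1:]
--     return "".join(parts)
-- ===== Notes on version B (the rewrite author's own statement) =====
-- stated objective: alternative
-- what changed: Replaced the character-by-character two-flag state machine with a chunk tokenizer: find the next quote, rewrite the unquoted chunk with one str.replace call, copy the quoted span verbatim up to the matching quote (SQL's doubled-quote escape equals close-and-reopen), and join the chunks.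
import Mathlib
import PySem

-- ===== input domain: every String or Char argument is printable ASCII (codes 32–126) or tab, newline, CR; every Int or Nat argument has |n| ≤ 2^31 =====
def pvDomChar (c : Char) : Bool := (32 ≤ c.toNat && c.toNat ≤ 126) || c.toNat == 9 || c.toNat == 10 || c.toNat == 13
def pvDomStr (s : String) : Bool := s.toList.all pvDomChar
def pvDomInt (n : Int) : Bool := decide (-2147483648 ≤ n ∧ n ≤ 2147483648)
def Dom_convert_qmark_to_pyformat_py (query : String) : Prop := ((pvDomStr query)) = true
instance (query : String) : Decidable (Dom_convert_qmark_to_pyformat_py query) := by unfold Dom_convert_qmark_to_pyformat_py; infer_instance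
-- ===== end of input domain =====

-- B rewrites the query by chunks (find next quote / copy quoted span verbatim / str.replace on the
-- unquoted chunk) instead of A's character-by-character two-flag state machine; objective: alternative.


-- ===== PORT A =====
-- A's while loop, one step per iteration; `out` collects the appended pieces in reverse
-- (out.append(ch) ↦ cons, out.append("%s") ↦ 's' :: '%' ::); the final "".join is the reversal.
def pvALoop : List Char → Bool → Bool → List Char → List Char
  | [], _, _, out => out
  | ch :: t, insin, indou, out =>
    if insin then
      -- escape de aspas simples em SQL: ''
      if ch = '\'' ∧ t ≠ [] ∧ t.headI = '\'' then
        pvALoop t.tail insin indou (t.headI :: ch :: out)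
      else if ch = '\'' then pvALoop t false indou (ch :: out)
      else pvALoop t insin indou (ch :: out)
    else if indou then
      if ch = '"' then pvALoop t insin false (ch :: out)
      else pvALoop t insin indou (ch :: out)
    else if ch = '\'' then pvALoop t true indou (ch :: out)
    else if ch = '"' then pvALoop t insin true (ch :: out)
    else if ch = '?' then pvALoop t insin indou ('s' :: '%' :: out)
    else pvALoop t insin indou (ch :: out)
termination_by l _ _ _ => l.length
decreasing_by all_goals (simp [List.length_tail]; try omega)

def convert_qmark_to_pyformat_py (query : String) : String :=
  if PySem.Str.isIn "?" query = false then query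
  else String.ofList ((pvALoop query.toList false false []).reverse)

-- ===== PORT B =====
-- j = sq if dq == -1 else dq if sq == -1 else min(sq, dq)
def pvJ (rest : List Char) : Int :=
  if PySem.Chars.find rest ['"'] = -1 then PySem.Chars.find rest ['\'']
  else if PySem.Chars.find rest ['\''] = -1 then PySem.Chars.find rest ['"']
  else min (PySem.Chars.find rest ['\'']) (PySem.Chars.find rest ['"'])

lemma pv_J_lb (rest : List Char) : -1 ≤ pvJ rest := by
  unfold pvJ; split_ifs <;>
    simp [PySem.Chars.neg_one_le_find]

lemma pv_findFrom_lb (s sub : List Char) (st : Int) (h : 0 ≤ st) :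
    PySem.Chars.findFrom s sub st none = -1 ∨ st ≤ PySem.Chars.findFrom s sub st none := by
  simp only [PySem.Chars.findFrom]
  split_ifs <;> try (exact Or.inl rfl)
  all_goals
    first
      | omega
      | · rename_i hfind
          have h2 := PySem.Chars.neg_one_le_find (List.drop (st + (s.length:Int)).toNat (List.take ((s.length:Int)).toNat s)) sub
          have h3 := PySem.Chars.neg_one_le_find (List.drop st.toNat (List.take ((s.length:Int)).toNat s)) sub
          omega

-- q = rest[j] (j is an index found by find, hence in range; the default is never used)
def pvQ (rest : List Char) : Char := (PySem.List.pyGet? rest (pvJ rest)).getD ' '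

-- k = rest.find(q, j + 1)
def pvK (rest : List Char) : Int := PySem.Chars.findFrom rest [pvQ rest] (pvJ rest + 1) none

-- the `while rest:` loop of B; the appended parts are concatenated as we go ("".join)
def pvBLoop (rest : List Char) : List Char :=
  if rest = [] then []
  else if pvJ rest = -1 then PySem.Chars.replace rest ['?'] ['%', 's']
  else if pvK rest = -1 then
    PySem.Chars.replace (PySem.List.slice rest none (some (pvJ rest))) ['?'] ['%', 's']
      ++ PySem.List.slice rest (some (pvJ rest)) none
  else
    PySem.Chars.replace (PySem.List.slice rest none (some (pvJ rest))) ['?'] ['%', 's']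
      ++ PySem.List.slice rest (some (pvJ rest)) (some (pvK rest + 1))
      ++ pvBLoop (PySem.List.slice rest (some (pvK rest + 1)) none)
termination_by rest.length
decreasing_by
  rename_i hne hj hk
  have hJ : 0 ≤ pvJ rest := by have := pv_J_lb rest; omega
  have hK : 0 ≤ pvK rest := by
    have := pv_findFrom_lb rest [pvQ rest] (pvJ rest + 1) (by omega)
    unfold pvK at hk ⊢; omega
  rw [PySem.List.slice_from _ (by omega : (0:Int) ≤ pvK rest + 1)]
  have hlen : 0 < rest.length := List.length_pos_iff.mpr hne
  have h1 : 1 ≤ (pvK rest + 1).toNat := by omega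
  simp only [List.length_drop]; omega

def convert_qmark_to_pyformat_py_alt (query : String) : String :=
  String.ofList (pvBLoop query.toList)

-- ===== PRECONDITION & SPEC =====
def Spec_convert_qmark_to_pyformat_py (query : String) (out : String) : Prop := out = convert_qmark_to_pyformat_py_alt query
instance (query : String) (out : String) : Decidable (Spec_convert_qmark_to_pyformat_py query out) := by unfold Spec_convert_qmark_to_pyformat_py; infer_instance

-- ===== CLAIM (what is proved, stated in full; the proofs are below) =====
def Claim_equal_convert_qmark_to_pyformat_py : Prop := ∀ (query : String), Dom_convert_qmark_to_pyformat_py query → Spec_convert_qmark_to_pyformat_py query (convert_qmark_to_pyformat_py query)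

-- ===== LEMMAS AND PROOFS =====

-- the per-character rewrite performed outside quotes
def pvRepl (l : List Char) : List Char := l.flatMap (fun c => if c = '?' then ['%', 's'] else [c])

-- the pure toggle machine: A's machine with the '' escape dropped (close-and-reopen instead)
def pvTog : List Char → Bool → Bool → List Char
  | [], _, _ => []
  | c :: t, sin, dou =>
    if sin then c :: pvTog t (if c = '\'' then false else true) dou
    else if dou then c :: pvTog t sin (if c = '"' then false else true)
    else if c = '\'' then c :: pvTog t true dou
    else if c = '"' then c :: pvTog t sin true
    else if c = '?' then '%' :: 's' :: pvTog t sin dou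
    else c :: pvTog t sin dou


lemma pv_singleton_prefix (q : Char) (l : List Char) : [q] <+: l ↔ l.head? = some q := by
  cases l with
  | nil => simp
  | cons a t =>
    constructor
    · rintro ⟨r, hr⟩; simp at hr; simp [hr.1]
    · intro h; simp at h; exact ⟨t, by simp [h]⟩

lemma pv_singleton_prefix_drop (q : Char) (l : List Char) (i : Nat) :
    [q] <+: l.drop i ↔ l[i]? = some q := by
  rw [pv_singleton_prefix, List.head?_drop]

-- first occurrence of q in t ++ q :: u when q ∉ t
lemma pv_find_decomp (q : Char) (t u : List Char) (ht : q ∉ t) :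
    PySem.Chars.find (t ++ q :: u) [q] = (t.length : Int) := by
  have hmem : [q] <:+: (t ++ q :: u) := (List.singleton_infix_iff q _).mpr (by simp)
  have hne : PySem.Chars.find (t ++ q :: u) [q] ≠ -1 :=
    (PySem.Chars.find_ne_neg_one_iff _ _).mpr hmem
  have hge : 0 ≤ PySem.Chars.find (t ++ q :: u) [q] := by
    have := PySem.Chars.neg_one_le_find (t ++ q :: u) [q]
    omega
  obtain ⟨hpre, hmin⟩ := PySem.Chars.find_spec hge
  rw [pv_singleton_prefix_drop] at hpre
  have hat : (t ++ q :: u)[t.length]? = some q := by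
    simp
  have hle : (PySem.Chars.find (t ++ q :: u) [q]).toNat ≤ t.length := by
    by_contra hlt
    exact absurd ((pv_singleton_prefix_drop q _ _).mpr hat) (hmin t.length (by omega))
  have hgt : ¬ (PySem.Chars.find (t ++ q :: u) [q]).toNat < t.length := by
    intro hlt
    have : (t ++ q :: u)[(PySem.Chars.find (t ++ q :: u) [q]).toNat]? = t[(PySem.Chars.find (t ++ q :: u) [q]).toNat]? := by
      rw [List.getElem?_append_left hlt]
    rw [this] at hpre
    exact ht (List.mem_of_getElem? hpre)
  omega

lemma pv_find_none (q : Char) (l : List Char) (h : q ∉ l) :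
    PySem.Chars.find l [q] = -1 :=
  (PySem.Chars.find_eq_neg_one_iff _ _).mpr (fun hc => h ((List.singleton_infix_iff q l).mp hc))

-- if q does not occur in the prefix t, find is -1 or lands past t
lemma pv_find_lb (q : Char) (t u : List Char) (ht : q ∉ t) :
    PySem.Chars.find (t ++ u) [q] = -1 ∨ (t.length : Int) ≤ PySem.Chars.find (t ++ u) [q] := by
  by_cases h : PySem.Chars.find (t ++ u) [q] = -1
  · exact Or.inl h
  · right
    have hge : 0 ≤ PySem.Chars.find (t ++ u) [q] := by
      have := PySem.Chars.neg_one_le_find (t ++ u) [q]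
      omega
    obtain ⟨hpre, -⟩ := PySem.Chars.find_spec hge
    rw [pv_singleton_prefix_drop] at hpre
    by_contra hlt
    have hlt' : (PySem.Chars.find (t ++ u) [q]).toNat < t.length := by omega
    rw [List.getElem?_append_left hlt'] at hpre
    exact ht (List.mem_of_getElem? hpre)

-- str.replace with the one-character pattern "?" is the per-character rewrite
lemma pv_replace_go (fuel : Nat) (l acc : List Char) (h : l.length ≤ fuel) :
    PySem.Chars.replace.go ['?'] ['%', 's'] fuel l acc = acc.reverse ++ pvRepl l := by
  induction fuel generalizing l acc with
  | zero =>
    have : l = [] := List.length_eq_zero_iff.mp (by omega)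
    subst this
    simp [PySem.Chars.replace.go, pvRepl]
  | succ n ih =>
    cases l with
    | nil => simp [PySem.Chars.replace.go, pvRepl]
    | cons c t =>
      simp only [PySem.Chars.replace.go]
      by_cases hc : c = '?'
      · subst hc
        rw [if_pos (by simp [List.isPrefixOf])]
        simp only [List.length_cons] at h
        rw [ih _ _ (by simpa using h)]
        simp [pvRepl]
      · rw [if_neg (by simp only [List.isPrefixOf, Bool.and_eq_true, beq_iff_eq]; exact fun hcc => hc hcc.1.symm)]
        simp only [List.length_cons] at h
        rw [ih _ _ (by omega)]
        simp [pvRepl, hc]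

lemma pv_replace_eq (l : List Char) :
    PySem.Chars.replace l ['?'] ['%', 's'] = pvRepl l := by
  rw [PySem.Chars.replace, if_neg (by simp)]
  simpa using pv_replace_go l.length l [] le_rfl

-- ===== facts about the toggle machine =====

lemma pv_tog_noq : ∀ (rest : List Char) (_ : '?' ∉ rest) (sin dou : Bool),
    pvTog rest sin dou = rest
  | [], _, _, _ => rfl
  | c :: t, h, sin, dou => by
    simp only [List.mem_cons, not_or] at h
    have ih := fun sin dou => pv_tog_noq t h.2 sin dou
    simp only [pvTog]
    split_ifs <;> cases dou <;> simp_all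

lemma pv_tog_free (t m : List Char) (h : ∀ c ∈ t, c ≠ '\'' ∧ c ≠ '"') :
    pvTog (t ++ m) false false = pvRepl t ++ pvTog m false false := by
  induction t with
  | nil => simp [pvRepl]
  | cons c t ih =>
    obtain ⟨⟨h1, h2⟩, hrest⟩ := List.forall_mem_cons.mp h
    by_cases hc : c = '?' <;>
      simp [pvTog, h1, h2, hc, pvRepl, ih hrest]

lemma pv_tog_sin_end (v : List Char) (h : '\'' ∉ v) : pvTog v true false = v := by
  induction v with
  | nil => rfl
  | cons c t ih =>
    simp only [List.mem_cons, not_or] at h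
    have hc : ¬ c = '\'' := fun hc => h.1 hc.symm
    simp [pvTog, hc, ih h.2]

lemma pv_tog_sin (v w : List Char) (h : '\'' ∉ v) :
    pvTog (v ++ '\'' :: w) true false = v ++ '\'' :: pvTog w false false := by
  induction v with
  | nil => simp [pvTog]
  | cons c t ih =>
    simp only [List.mem_cons, not_or] at h
    have hc : ¬ c = '\'' := fun hc => h.1 hc.symm
    simp [pvTog, hc, ih h.2]

lemma pv_tog_dou_end (v : List Char) (h : '"' ∉ v) : pvTog v false true = v := by
  induction v with
  | nil => rfl
  | cons c t ih =>
    simp only [List.mem_cons, not_or] at h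
    have hc : ¬ c = '"' := fun hc => h.1 hc.symm
    simp [pvTog, hc, ih h.2]

lemma pv_tog_dou (v w : List Char) (h : '"' ∉ v) :
    pvTog (v ++ '"' :: w) false true = v ++ '"' :: pvTog w false false := by
  induction v with
  | nil => simp [pvTog]
  | cons c t ih =>
    simp only [List.mem_cons, not_or] at h
    have hc : ¬ c = '"' := fun hc => h.1 hc.symm
    simp [pvTog, hc, ih h.2]

-- ===== A's machine equals the toggle machine =====

lemma pv_aloop_eq_tog (n : Nat) :
    ∀ (rest : List Char) (sin dou : Bool) (out : List Char), rest.length ≤ n →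
      ¬(sin = true ∧ dou = true) →
      pvALoop rest sin dou out = (pvTog rest sin dou).reverse ++ out := by
  induction n with
  | zero =>
    intro rest sin dou out h _
    have : rest = [] := List.length_eq_zero_iff.mp (by omega)
    subst this
    simp [pvALoop, pvTog]
  | succ n ih =>
    intro rest sin dou out h hsd
    cases rest with
    | nil => simp [pvALoop, pvTog]
    | cons ch t =>
      simp only [List.length_cons] at h
      by_cases hs : sin = true
      · subst hs
        have hd : dou = false := by
          cases dou
          · rfl
          · exact absurd ⟨rfl, rfl⟩ hsd
        subst hd
        by_cases hesc : ch = '\'' ∧ t ≠ [] ∧ t.headI = '\''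
        · obtain ⟨hch, hne, hhd⟩ := hesc
          subst hch
          obtain ⟨c2, t2, rfl⟩ : ∃ c2 t2, t = c2 :: t2 := by
            cases t with
            | nil => exact absurd rfl hne
            | cons a b => exact ⟨a, b, rfl⟩
          simp only [List.headI] at hhd
          subst hhd
          rw [show pvALoop ('\'' :: '\'' :: t2) true false out
              = pvALoop t2 true false ('\'' :: '\'' :: out) by
            simp [pvALoop]]
          rw [ih t2 true false _ (by simp at h ⊢; omega) (by simp)]
          simp [pvTog]
        · rw [show pvALoop (ch :: t) true false out
              = if ch = '\'' then pvALoop t false false (ch :: out)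
                else pvALoop t true false (ch :: out) by
            simp [pvALoop, hesc]]
          by_cases hch : ch = '\''
          · subst hch
            rw [if_pos rfl, ih t false false _ (by omega) (by simp)]
            simp [pvTog]
          · rw [if_neg hch, ih t true false _ (by omega) (by simp)]
            simp [pvTog, hch]
      · have hs' : sin = false := by cases sin; rfl; exact absurd rfl hs
        subst hs'
        by_cases hd : dou = true
        · subst hd
          by_cases hch : ch = '"'
          · subst hch
            rw [show pvALoop ('"' :: t) false true out = pvALoop t false false ('"' :: out) by
                simp [pvALoop]]
            rw [ih t false false _ (by omega) (by simp)]
            simp [pvTog]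
          · rw [show pvALoop (ch :: t) false true out = pvALoop t false true (ch :: out) by
                simp [pvALoop, hch]]
            rw [ih t false true _ (by omega) (by simp)]
            simp [pvTog, hch]
        · have hd' : dou = false := by cases dou; rfl; exact absurd rfl hd
          subst hd'
          by_cases h1 : ch = '\''
          · subst h1
            rw [show pvALoop ('\'' :: t) false false out = pvALoop t true false ('\'' :: out) by
                simp [pvALoop]]
            rw [ih t true false _ (by omega) (by simp)]
            simp [pvTog]
          · by_cases h2 : ch = '"'
            · subst h2
              rw [show pvALoop ('"' :: t) false false out = pvALoop t false true ('"' :: out) by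
                  simp [pvALoop]]
              rw [ih t false true _ (by omega) (by simp)]
              simp [pvTog]
            · by_cases h3 : ch = '?'
              · subst h3
                rw [show pvALoop ('?' :: t) false false out
                    = pvALoop t false false ('s' :: '%' :: out) by
                  simp [pvALoop]]
                rw [ih t false false _ (by omega) (by simp)]
                simp [pvTog]
              · rw [show pvALoop (ch :: t) false false out = pvALoop t false false (ch :: out) by
                    simp [pvALoop, h1, h2, h3]]
                rw [ih t false false _ (by omega) (by simp)]
                simp [pvTog, h1, h2, h3]

-- ===== the toggle machine equals B's chunk loop =====

lemma pv_split_first (p : Char → Bool) :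
    ∀ l : List Char, (¬ ∀ c ∈ l, p c = true) →
      ∃ t q u, l = t ++ q :: u ∧ (∀ c ∈ t, p c = true) ∧ p q = false
  | [], h => absurd (by simp) h
  | c :: l, h => by
    by_cases hc : p c = true
    · have h' : ¬ ∀ x ∈ l, p x = true := fun hl => h (by simp [hc]; exact fun a ha => hl a ha)
      obtain ⟨t, q, u, hl, ht, hq⟩ := pv_split_first p l h'
      exact ⟨c :: t, q, u, by rw [hl]; rfl, by simpa [hc] using ht, hq⟩
    · exact ⟨[], c, l, rfl, by simp, by simpa using hc⟩

lemma pv_J_none (rest : List Char) (h : ∀ c ∈ rest, c ≠ '\'' ∧ c ≠ '"') : pvJ rest = -1 := by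
  have h1 : '\'' ∉ rest := fun hm => (h _ hm).1 rfl
  have h2 : '"' ∉ rest := fun hm => (h _ hm).2 rfl
  unfold pvJ
  rw [pv_find_none _ _ h1, pv_find_none _ _ h2]
  simp

lemma pv_J_decomp (t u : List Char) (q : Char) (ht : ∀ c ∈ t, c ≠ '\'' ∧ c ≠ '"')
    (hq : q = '\'' ∨ q = '"') : pvJ (t ++ q :: u) = (t.length : Int) := by
  have h1 : '\'' ∉ t := fun hm => (ht _ hm).1 rfl
  have h2 : '"' ∉ t := fun hm => (ht _ hm).2 rfl
  unfold pvJ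
  rcases hq with rfl | rfl
  · have hsq : PySem.Chars.find (t ++ '\'' :: u) ['\''] = (t.length : Int) :=
      pv_find_decomp _ _ _ h1
    have h2' : '"' ∉ t ++ ['\''] := by simp [h2]
    have hdq := pv_find_lb '"' (t ++ ['\'']) u h2'
    rw [List.append_assoc] at hdq
    simp only [List.singleton_append, List.length_append, List.length_singleton] at hdq
    rcases hdq with hdq | hdq
    · rw [hdq, if_pos rfl, hsq]
    · rw [hsq]
      rw [if_neg (by push_cast at hdq ⊢; omega), if_neg (by omega)]
      push_cast at hdq ⊢
      omega
  · have hdq : PySem.Chars.find (t ++ '"' :: u) ['"'] = (t.length : Int) :=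
      pv_find_decomp _ _ _ h2
    have h1' : '\'' ∉ t ++ ['"'] := by simp [h1]
    have hsq := pv_find_lb '\'' (t ++ ['"']) u h1'
    rw [List.append_assoc] at hsq
    simp only [List.singleton_append, List.length_append, List.length_singleton] at hsq
    rw [if_neg (by rw [hdq]; omega)]
    rcases hsq with hsq | hsq
    · rw [if_pos hsq, hdq]
    · rw [if_neg (by omega), hdq]
      push_cast at hsq ⊢
      omega

lemma pv_Q_decomp (t u : List Char) (q : Char) (ht : ∀ c ∈ t, c ≠ '\'' ∧ c ≠ '"')
    (hq : q = '\'' ∨ q = '"') : pvQ (t ++ q :: u) = q := by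
  unfold pvQ
  rw [pv_J_decomp t u q ht hq, PySem.List.pyGet?_natCast]
  simp

lemma pv_tog_eq_bloop (n : Nat) :
    ∀ (rest : List Char), rest.length ≤ n → pvTog rest false false = pvBLoop rest := by
  induction n with
  | zero =>
    intro rest h
    have : rest = [] := List.length_eq_zero_iff.mp (by omega)
    subst this
    rw [pvBLoop]
    simp [pvTog]
  | succ n ih =>
    intro rest hn
    by_cases hnil : rest = []
    · subst hnil
      rw [pvBLoop]
      simp [pvTog]
    by_cases hall : ∀ c ∈ rest, c ≠ '\'' ∧ c ≠ '"'
    · -- no quote anywhere: one chunk, plain replace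
      rw [pvBLoop, if_neg hnil, if_pos (pv_J_none rest hall), pv_replace_eq]
      have := pv_tog_free rest [] hall
      simpa [pvTog] using this
    · -- split at the first quote
      have hall' : ¬ ∀ c ∈ rest, (!(c = '\'' || c = '"')) = true := by
        intro hc
        exact hall (fun c hm => by have := hc c hm; simp at this; exact this)
      obtain ⟨t, q, u, rfl, ht', hq'⟩ := pv_split_first _ rest hall'
      have ht : ∀ c ∈ t, c ≠ '\'' ∧ c ≠ '"' := fun c hm => by
        have := ht' c hm; simp at this; exact this
      have hq : q = '\'' ∨ q = '"' := by
        simp at hq'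
        by_cases h : q = '\''
        · exact Or.inl h
        · exact Or.inr (hq' h)
      have hJ := pv_J_decomp t u q ht hq
      have hQ := pv_Q_decomp t u q ht hq
      have hJne : ¬ pvJ (t ++ q :: u) = -1 := by rw [hJ]; omega
      have hlen : t.length + 1 ≤ (t ++ q :: u).length := by simp
      have hdrop : (t ++ q :: u).drop (t.length + 1) = u := by simp
      have hK : pvK (t ++ q :: u)
          = if PySem.Chars.find u [q] = -1 then -1
            else ((t.length + 1 : Nat) : Int) + PySem.Chars.find u [q] := by
        unfold pvK
        rw [hQ, hJ]
        rw [show ((t.length : Int) + 1) = ((t.length + 1 : Nat) : Int) by push_cast; ring]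
        rw [PySem.Chars.findFrom_natCast _ _ _ hlen, hdrop]
      have htake : (t ++ q :: u).take t.length = t := by simp
      have hdropt : (t ++ q :: u).drop t.length = q :: u := by simp
      by_cases hmem : q ∈ u
      · -- the quote is closed: quoted span verbatim, recurse after it
        have humem : ¬ ∀ c ∈ u, (!(c = q)) = true := by
          intro hc
          have := hc q hmem
          simp at this
        obtain ⟨v, q2, w, hu, hv', hq2⟩ := pv_split_first _ u humem
        have hq2' : q2 = q := by simpa using hq2
        subst q2
        subst u
        have hvq : q ∉ v := fun hm => by have := hv' q hm; simp at this
        have hfind : PySem.Chars.find (v ++ q :: w) [q] = (v.length : Int) :=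
          pv_find_decomp _ _ _ hvq
        have hKv : pvK (t ++ q :: (v ++ q :: w))
            = ((t.length + 1 + v.length : Nat) : Int) := by
          rw [hK, hfind, if_neg (by omega)]
          push_cast
          ring
        rw [pvBLoop, if_neg hnil, if_neg hJne, if_neg (by rw [hKv]; omega)]
        rw [hKv]
        rw [show (((t.length + 1 + v.length : Nat) : Int) + 1)
            = ((t.length + 1 + v.length + 1 : Nat) : Int) by push_cast; ring]
        rw [hJ, PySem.List.slice_to_natCast, PySem.List.slice_natCast, PySem.List.slice_from_natCast]
        rw [htake, hdropt, pv_replace_eq]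
        have hdrop2 : (t ++ q :: (v ++ q :: w)).drop (t.length + 1 + v.length + 1) = w := by
          rw [show t ++ q :: (v ++ q :: w) = (t ++ q :: (v ++ [q])) ++ w by simp]
          rw [show t.length + 1 + v.length + 1 = (t ++ q :: (v ++ [q])).length by simp; omega]
          simp
        rw [hdrop2]
        have htake2 : (q :: (v ++ q :: w)).take (t.length + 1 + v.length + 1 - t.length)
            = q :: (v ++ [q]) := by
          rw [show t.length + 1 + v.length + 1 - t.length = v.length + 1 + 1 by omega]
          simp [List.take_append]
        rw [htake2]
        have hw : w.length ≤ n := by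
          simp only [List.length_append, List.length_cons] at hn
          omega
        rw [← ih w hw]
        rw [pv_tog_free t (q :: (v ++ q :: w)) ht]
        rcases hq with rfl | rfl
        · rw [show pvTog ('\'' :: (v ++ '\'' :: w)) false false
              = '\'' :: pvTog (v ++ '\'' :: w) true false by simp [pvTog]]
          rw [pv_tog_sin v w hvq]
          simp
        · rw [show pvTog ('"' :: (v ++ '"' :: w)) false false
              = '"' :: pvTog (v ++ '"' :: w) false true by simp [pvTog]]
          rw [pv_tog_dou v w hvq]
          simp
      · -- unterminated quote: the tail is copied verbatim and the loop ends
        have hKe : pvK (t ++ q :: u) = -1 := by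
          rw [hK, pv_find_none _ _ hmem, if_pos rfl]
        rw [pvBLoop, if_neg hnil, if_neg hJne, if_pos hKe]
        rw [hJ, PySem.List.slice_to_natCast, PySem.List.slice_from_natCast]
        rw [htake, hdropt, pv_replace_eq]
        rw [pv_tog_free t (q :: u) ht]
        rcases hq with rfl | rfl
        · rw [show pvTog ('\'' :: u) false false = '\'' :: pvTog u true false by simp [pvTog]]
          rw [pv_tog_sin_end u hmem]
        · rw [show pvTog ('"' :: u) false false = '"' :: pvTog u false true by simp [pvTog]]
          rw [pv_tog_dou_end u hmem]

-- ===== final assembly =====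

-- ===== VERDICT (by name: the statement is the Claim_ definition above) =====
theorem convert_qmark_to_pyformat_py_spec : Claim_equal_convert_qmark_to_pyformat_py := by
  intro query _
  unfold Spec_convert_qmark_to_pyformat_py convert_qmark_to_pyformat_py convert_qmark_to_pyformat_py_alt
  rw [← pv_tog_eq_bloop query.toList.length query.toList le_rfl]
  by_cases h : PySem.Str.isIn "?" query = false
  · rw [if_pos h]
    have hnq : '?' ∉ query.toList := by
      intro hm
      have hinf : ("?" : String).toList <:+: query.toList := by
        have : ("?" : String).toList = ['?'] := by decide
        rw [this]
        exact (List.singleton_infix_iff _ _).mpr hm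
      have htrue : PySem.Str.isIn "?" query = true := (PySem.Str.isIn_iff_infix _ _).mpr hinf
      rw [htrue] at h
      cases h
    rw [pv_tog_noq _ hnq, String.ofList_toList]
  · rw [if_neg h]
    rw [pv_aloop_eq_tog query.toList.length query.toList false false [] le_rfl (by simp)]
    simp
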